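-- pv_equiv track=rewrite | github.com/unanmed/ginka-generator | ginka/model/loss.py | get_not_allowed
-- ===== SOURCE A (Python) =====
-- CLASS_NUM = 32
--
-- ILLEGAL_MAX_NUM = 12
--
-- def get_not_allowed(classes: list[int], include_illegal=False):
--     res = list()
--     for num in range(0, CLASS_NUM):
--         if not num in classes:
--             if num > ILLEGAL_MAX_NUM:
--                 if include_illegal:
--                     res.append(num)
--             else:
--                 res.append(num)
--
--     return res
-- ===== SOURCE B (Python) =====
-- CLASS_NUM = 32
--
-- ILLEGAL_MAX_NUM = 12
--
-- def get_not_allowed(classes: list[int], include_illegal=False):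
--     # sort the distinct class numbers and emit the gaps between consecutive
--     # ones, clipped to [0, bound); a merge-style gap scan, no membership tests
--     bound = CLASS_NUM if include_illegal else ILLEGAL_MAX_NUM + 1
--     res = []
--     lo = 0
--     for c in sorted(set(classes)) + [bound]:
--         res.extend(range(lo, min(c, bound)))
--         lo = max(lo, c + 1)
--     return res
-- ===== Notes on version B (the rewrite author's own statement) =====
-- stated objective: alternative
-- what changed: Replaces the per-number range scan with nested branches by a sort-then-gap-scan: sort the distinct class numbers and emit the runs of missing numbers between consecutive ones, clipped to [0, bound) with bound folding in the illegal-number condition; no membership test at all.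
import Mathlib
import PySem

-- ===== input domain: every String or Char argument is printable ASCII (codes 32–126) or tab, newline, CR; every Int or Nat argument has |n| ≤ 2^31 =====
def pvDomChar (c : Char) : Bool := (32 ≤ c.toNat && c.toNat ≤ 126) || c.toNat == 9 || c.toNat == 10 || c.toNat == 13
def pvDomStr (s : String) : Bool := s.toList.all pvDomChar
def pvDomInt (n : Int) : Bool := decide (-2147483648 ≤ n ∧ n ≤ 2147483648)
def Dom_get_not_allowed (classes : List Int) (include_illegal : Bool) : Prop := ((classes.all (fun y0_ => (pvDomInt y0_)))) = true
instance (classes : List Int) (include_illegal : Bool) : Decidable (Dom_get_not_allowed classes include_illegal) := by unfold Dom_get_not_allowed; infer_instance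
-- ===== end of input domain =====

-- B replaces the per-number range scan with nested branches by a sort-then-gap-scan
-- (emit the runs of missing numbers between consecutive sorted distinct classes,
-- clipped to [0, bound)); objective: alternative.

-- ===== PORT A =====
-- literal transliteration: loop over range(0, 32), nested branches in source order
def get_not_allowed (classes : List Int) (include_illegal : Bool) : List Int :=
  (PySem.List.pyRange 0 32 1).foldl (fun res num =>
    if !(classes.contains num) then
      if num > 12 then
        (if include_illegal then res ++ [num] else res)
      else
        res ++ [num]
    else res) []

-- ===== PORT B =====
-- bound = 32 if include_illegal else 12 + 1; gap scan over sorted(set(classes)) + [bound]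
def get_not_allowed_alt (classes : List Int) (include_illegal : Bool) : List Int :=
  let bound : Int := if include_illegal then 32 else 12 + 1
  ((PySem.List.sorted (PySem.Set.ofList classes) (fun x => x) false ++ [bound]).foldl
    (fun (st : List Int × Int) c =>
      (st.1 ++ PySem.List.pyRange st.2 (min c bound) 1, max st.2 (c + 1))) ([], 0)).1

-- ===== PRECONDITION & SPEC =====
def Spec_get_not_allowed (classes : List Int) (include_illegal : Bool) (out : List Int) : Prop := out = get_not_allowed_alt classes include_illegal
instance (classes : List Int) (include_illegal : Bool) (out : List Int) : Decidable (Spec_get_not_allowed classes include_illegal out) := by unfold Spec_get_not_allowed; infer_instance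

-- ===== CLAIM (what is proved, stated in full; the proofs are below) =====
def Claim_equal_get_not_allowed : Prop := ∀ (classes : List Int) (include_illegal : Bool), Dom_get_not_allowed classes include_illegal → Spec_get_not_allowed classes include_illegal (get_not_allowed classes include_illegal)

-- ===== LEMMAS AND PROOFS =====

-- A's loop is a filter of the range by "not in classes and (num ≤ 12 or include_illegal)"
theorem getNA_A_eq_filter (classes : List Int) (ii : Bool) :
    get_not_allowed classes ii =
      (PySem.List.pyRange 0 32 1).filter
        (fun num => !(classes.contains num) && (!(decide (num > 12)) || ii)) := by
  unfold get_not_allowed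
  have h : (fun (res : List Int) (num : Int) =>
      if !(classes.contains num) then
        if num > 12 then (if ii then res ++ [num] else res) else res ++ [num]
      else res)
      = (fun res num =>
        if (!(classes.contains num) && (!(decide (num > 12)) || ii)) = true then res ++ [num] else res) := by
    funext res num
    by_cases hc : classes.contains num <;> by_cases h12 : num > 12 <;>
      cases ii <;> simp [h12]
  rw [h, PySem.List.foldl_append_if_eq_filter]
  simp

-- B's gap scan over a strictly increasing list cs (terminated by bound) produces
-- exactly the numbers of [lo, bound) not in cs, appended to the accumulator
theorem getNA_gap_fold (bound : Int) (cs : List Int) :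
    cs.Pairwise (· < ·) → ∀ (res : List Int) (lo : Int),
    ((cs ++ [bound]).foldl
      (fun (st : List Int × Int) c =>
        (st.1 ++ PySem.List.pyRange st.2 (min c bound) 1, max st.2 (c + 1))) (res, lo)).1
    = res ++ (PySem.List.pyRange lo bound 1).filter (fun x => !(cs.contains x)) := by
  induction cs with
  | nil =>
    intro _ res lo
    simp [List.foldl, min_self]
  | cons c cs' ih =>
    intro hp res lo
    have hlt : ∀ x ∈ cs', c < x := by
      intro x hx; exact (List.pairwise_cons.mp hp).1 x hx
    have hp' : cs'.Pairwise (· < ·) := (List.pairwise_cons.mp hp).2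
    simp only [List.cons_append, List.foldl_cons]
    rw [ih hp']
    by_cases hclo : c < lo
    · -- c below the window: nothing emitted, lo unchanged
      have h1 : PySem.List.pyRange lo (min c bound) 1 = [] :=
        PySem.List.pyRange_one_eq_nil (by omega : min c bound ≤ lo)
      have h2 : max lo (c + 1) = lo := by omega
      rw [h1, h2, List.append_nil]
      congr 1
      apply List.filter_congr
      intro x hx
      have hmem := (PySem.List.mem_pyRange_one.mp hx).1
      have hne : ¬ (x = c) := by omega
      simp [hne]
    · by_cases hcb : bound ≤ c
      · -- c at-or-past bound: emit the rest of the window, then nothing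
        have h1 : min c bound = bound := by omega
        have h2 : PySem.List.pyRange (max lo (c + 1)) bound 1 = [] :=
          PySem.List.pyRange_one_eq_nil (by omega)
        rw [h1, h2]
        simp only [List.filter_nil, List.append_nil]
        congr 1
        symm
        rw [List.filter_eq_self]
        intro x hx
        have hmem := PySem.List.mem_pyRange_one.mp hx
        have hne : ¬ (x = c) := by omega
        have hncs : x ∉ cs' := fun h => by have := hlt x h; omega
        simp [hne, hncs]
      · -- lo ≤ c < bound: emit [lo, c), skip c, continue from c + 1
        have h1 : min c bound = c := by omega
        have h2 : max lo (c + 1) = c + 1 := by omega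
        rw [h1, h2,
          PySem.List.pyRange_one_append lo c bound (by omega) (by omega),
          PySem.List.pyRange_one_cons (by omega : c < bound)]
        rw [List.filter_append, List.filter_cons]
        have hcc : (!((c :: cs').contains c)) = false := by simp
        rw [hcc]
        simp only [Bool.false_eq_true, if_false]
        rw [List.append_assoc]
        have e1 : (PySem.List.pyRange lo c 1).filter (fun x => !((c :: cs').contains x))
            = PySem.List.pyRange lo c 1 := by
          rw [List.filter_eq_self]
          intro x hx
          have hmem := PySem.List.mem_pyRange_one.mp hx
          have hne : ¬ (x = c) := by omega
          have hncs : x ∉ cs' := fun h => by have := hlt x h; omega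
          simp [hne, hncs]
        have e2 : (PySem.List.pyRange (c + 1) bound 1).filter (fun x => !((c :: cs').contains x))
            = (PySem.List.pyRange (c + 1) bound 1).filter (fun x => !(cs'.contains x)) := by
          apply List.filter_congr
          intro x hx
          have hmem := (PySem.List.mem_pyRange_one.mp hx).1
          have hne : ¬ (x = c) := by omega
          simp [hne]
        rw [e1, e2]

-- B is the membership filter of range(0, bound)
theorem getNA_B_eq_filter (classes : List Int) (ii : Bool) :
    get_not_allowed_alt classes ii =
      (PySem.List.pyRange 0 (if ii then (32:Int) else 13) 1).filter
        (fun num => !(classes.contains num)) := by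
  unfold get_not_allowed_alt
  have hbd : (if ii then (32:Int) else 12 + 1) = (if ii then (32:Int) else 13) := by
    cases ii <;> norm_num
  rw [hbd]
  set bound : Int := if ii then (32:Int) else 13 with hb
  set cs : List Int := PySem.List.sorted (PySem.Set.ofList classes) (fun x => x) false with hcs
  rw [getNA_gap_fold bound cs (PySem.List.sorted_ofList_pairwise_lt classes) [] 0]
  rw [List.nil_append]
  apply List.filter_congr
  intro x _
  have hmem : x ∈ cs ↔ x ∈ classes := by
    rw [hcs, PySem.List.mem_sorted, PySem.Set.mem_ofList]
  by_cases h : x ∈ classes <;> simp [hmem, h]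

-- the two filters agree
theorem getNA_filters_eq (classes : List Int) (ii : Bool) :
    (PySem.List.pyRange 0 32 1).filter
        (fun num => !(classes.contains num) && (!(decide (num > 12)) || ii))
      = (PySem.List.pyRange 0 (if ii then (32:Int) else 13) 1).filter
        (fun num => !(classes.contains num)) := by
  cases ii
  · -- include_illegal = false: restrict the range to [0,13)
    simp only [if_neg (by simp : ¬ (false = true))]
    rw [PySem.List.pyRange_one_append 0 13 32 (by norm_num) (by norm_num), List.filter_append]
    have h2 : (PySem.List.pyRange 13 32 1).filter
        (fun num => !(classes.contains num) && (!(decide (num > 12)) || false)) = [] := by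
      rw [List.filter_eq_nil_iff]
      intro x hx
      have hge := (PySem.List.mem_pyRange_one.mp hx).1
      have h' : (12:Int) < x := by omega
      simp [h']
    rw [h2, List.append_nil]
    apply List.filter_congr
    intro x hx
    have hlt := (PySem.List.mem_pyRange_one.mp hx).2
    have h' : ¬ ((12:Int) < x) := by omega
    simp [h']
  · -- include_illegal = true: conditions coincide
    simp

-- ===== VERDICT (by name: the statement is the Claim_ definition above) =====
theorem get_not_allowed_spec : Claim_equal_get_not_allowed := by
  intro classes ii _
  unfold Spec_get_not_allowed
  rw [getNA_A_eq_filter, getNA_B_eq_filter, getNA_filters_eq]
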